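-- pv_equiv track=rewrite | github.com/nahowo/Algorithm-study | 프로그래머스/1/64061. 크레인 인형뽑기 게임/크레인 인형뽑기 게임.py | popStack
-- ===== SOURCE A (Python) =====
-- def popStack(stack): # 스택 제거하기
--     popCount=0
--     while len(stack)>=2:
--         if stack[-1]==stack[-2]:
--             stack.pop()
--             stack.pop()
--             popCount+=2
--         else:
--             break
--     return popCount
-- ===== SOURCE B (Python) =====
-- def popStack(stack):
--     # measure how many top elements form matching adjacent pairs, then delete in bulk
--     i = len(stack) - 1
--     count = 0
--     while i >= 1 and stack[i] == stack[i - 1]: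
--         count += 2
--         i -= 2
--     del stack[len(stack) - count:]
--     return count
-- ===== Notes on version B (the rewrite author's own statement) =====
-- stated objective: alternative
-- what changed: Replaces the destructive pop-two-at-a-time while loop by a non-mutating index scan that measures the number of matching top pairs, followed by one bulk slice deletion.
import Mathlib
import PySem

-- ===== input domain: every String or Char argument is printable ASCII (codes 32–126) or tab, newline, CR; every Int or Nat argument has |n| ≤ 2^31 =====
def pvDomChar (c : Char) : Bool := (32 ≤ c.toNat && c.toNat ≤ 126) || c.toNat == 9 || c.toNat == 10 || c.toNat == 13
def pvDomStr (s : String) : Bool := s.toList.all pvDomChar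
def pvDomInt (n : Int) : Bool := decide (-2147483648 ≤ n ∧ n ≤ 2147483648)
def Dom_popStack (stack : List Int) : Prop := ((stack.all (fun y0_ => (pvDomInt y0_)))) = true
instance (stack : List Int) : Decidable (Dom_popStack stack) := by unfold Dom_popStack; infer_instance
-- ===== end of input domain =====

-- B replaces A's destructive pop-two-at-a-time loop by a read-only index scan that measures
-- the matching top pairs plus one bulk slice deletion; both Pythons mutate the caller's list
-- identically, and the theorem below is about the return value.

-- ===== PORT A =====
-- popCount=0; while len(stack)>=2: if stack[-1]==stack[-2]: stack.pop(); stack.pop(); popCount+=2 else break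
-- (stack.pop() removes the last element = List.dropLast)
def popStackLoop (s : List Int) (popCount : Int) : Int :=
  if 2 ≤ s.length then
    if PySem.List.pyGet? s (-1) = PySem.List.pyGet? s (-2) then
      popStackLoop s.dropLast.dropLast (popCount + 2)
    else popCount
  else popCount
termination_by s.length
decreasing_by simp only [List.length_dropLast]; omega

def popStack (stack : List Int) : Int := popStackLoop stack 0

-- ===== PORT B =====
-- i = len(stack)-1; count = 0; while i >= 1 and stack[i] == stack[i-1]: count += 2; i -= 2; return count
def altLoop (s : List Int) (i : Int) (count : Int) : Int :=
  if h : 1 ≤ i then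
    if PySem.List.pyGet? s i = PySem.List.pyGet? s (i - 1) then
      altLoop s (i - 2) (count + 2)
    else count
  else count
termination_by i.toNat
decreasing_by omega

def popStack_alt (stack : List Int) : Int := altLoop stack ((stack.length : Int) - 1) 0

-- ===== PRECONDITION & SPEC =====
def Spec_popStack (stack : List Int) (out : Int) : Prop := out = popStack_alt stack
instance (stack : List Int) (out : Int) : Decidable (Spec_popStack stack out) := by unfold Spec_popStack; infer_instance

-- ===== CLAIM (what is proved, stated in full; the proofs are below) =====
def Claim_equal_popStack : Prop := ∀ (stack : List Int), Dom_popStack stack → Spec_popStack stack (popStack stack)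

-- ===== LEMMAS AND PROOFS =====

theorem concat2_of_two_le {s : List Int} (h : 2 ≤ s.length) :
    ∃ t b a, s = t ++ [b, a] := by
  rcases hr : s.reverse with _ | ⟨a, _ | ⟨b, r⟩⟩
  · have h0 : s.length = 0 := by simpa using congrArg List.length hr
    omega
  · have h0 : s.length = 1 := by simpa using congrArg List.length hr
    omega
  · refine ⟨r.reverse, b, a, ?_⟩
    have : s = s.reverse.reverse := by simp
    rw [this, hr]; simp

theorem pyGet?_append_left_int (t u : List Int) (i : Int) (h0 : 0 ≤ i) (h : i < (t.length : Int)) :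
    PySem.List.pyGet? (t ++ u) i = PySem.List.pyGet? t i := by
  rw [PySem.List.pyGet?_of_nonneg _ h0, PySem.List.pyGet?_of_nonneg _ h0]
  exact List.getElem?_append_left (by omega)

-- altLoop never looks past index i, so a suffix beyond i is irrelevant
theorem altLoop_append (t u : List Int) :
    ∀ (n : Nat) (i c : Int), i ≤ (n : Int) → i < (t.length : Int) →
      altLoop (t ++ u) i c = altLoop t i c := by
  intro n
  induction n with
  | zero =>
    intro i c hn h
    rw [altLoop]
    conv_rhs => rw [altLoop]
    rw [dif_neg (by omega : ¬ (1:Int) ≤ i), dif_neg (by omega : ¬ (1:Int) ≤ i)]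
  | succ n ih =>
    intro i c hn h
    by_cases h1 : 1 ≤ i
    · rw [altLoop]
      conv_rhs => rw [altLoop]
      rw [dif_pos h1, dif_pos h1,
        pyGet?_append_left_int t u i (by omega) h,
        pyGet?_append_left_int t u (i - 1) (by omega) (by omega)]
      split_ifs with heq
      · exact ih (i - 2) (c + 2) (by omega) (by omega)
      · rfl
    · rw [altLoop]
      conv_rhs => rw [altLoop]
      rw [dif_neg h1, dif_neg h1]

theorem pyGet?_concat2_neg1 (t : List Int) (b a : Int) :
    PySem.List.pyGet? (t ++ [b, a]) (-1) = some a := by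
  have h : t ++ [b, a] = (t ++ [b]) ++ [a] := by simp
  rw [h, PySem.List.pyGet?_neg_one_append_singleton]

theorem pyGet?_concat2_neg2 (t : List Int) (b a : Int) :
    PySem.List.pyGet? (t ++ [b, a]) (-2) = some b := by
  rw [PySem.List.pyGet?_neg_ofNat _ 2 (by omega) (by simp)]
  rw [List.length_append]
  simp

theorem pyGet?_concat2_top (t : List Int) (b a : Int) :
    PySem.List.pyGet? (t ++ [b, a]) (((t ++ [b, a]).length : Int) - 1) = some a := by
  have h : ((t ++ [b, a]).length : Int) - 1 = ((t.length + 1 : Nat) : Int) := by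
    simp; omega
  rw [h, PySem.List.pyGet?_natCast, List.getElem?_append_right (by omega)]
  simp

theorem pyGet?_concat2_top1 (t : List Int) (b a : Int) :
    PySem.List.pyGet? (t ++ [b, a]) (((t ++ [b, a]).length : Int) - 1 - 1) = some b := by
  have h : ((t ++ [b, a]).length : Int) - 1 - 1 = ((t.length : Nat) : Int) := by
    simp; omega
  rw [h, PySem.List.pyGet?_natCast, List.getElem?_append_right (by omega)]
  simp

-- one iteration of B's loop on a stack ending in [b, a]
theorem altLoop_step (t : List Int) (b a c : Int) :
    altLoop (t ++ [b, a]) (((t ++ [b, a]).length : Int) - 1) c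
      = if a = b then altLoop t ((t.length : Int) - 1) (c + 2) else c := by
  rw [altLoop, dif_pos (by simp; omega), pyGet?_concat2_top, pyGet?_concat2_top1]
  split_ifs with h1 h2 h2
  · have harg : ((t ++ [b, a]).length : Int) - 1 - 2 = (t.length : Int) - 1 := by
      simp; omega
    rw [harg]
    exact altLoop_append t [b, a] t.length _ (c + 2) (by omega) (by omega)
  · exact absurd (Option.some.inj h1) h2
  · exact absurd (congrArg some h2) h1
  · rfl

theorem loops_agree : ∀ (s : List Int) (c : Int),
    popStackLoop s c = altLoop s ((s.length : Int) - 1) c := by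
  intro s c
  induction s, c using popStackLoop.induct with
  | case1 s c h2 heq ih =>
    obtain ⟨t, b, a, rfl⟩ := concat2_of_two_le h2
    have hdl : (t ++ [b, a]).dropLast.dropLast = t := by
      have h : t ++ [b, a] = (t ++ [b]) ++ [a] := by simp
      rw [h, List.dropLast_concat, List.dropLast_concat]
    rw [popStackLoop, if_pos h2, if_pos heq, hdl, altLoop_step,
      if_pos (by rw [pyGet?_concat2_neg1, pyGet?_concat2_neg2] at heq
                 exact Option.some.inj heq)]
    rw [hdl] at ih
    exact ih
  | case2 s c h2 heq =>
    obtain ⟨t, b, a, rfl⟩ := concat2_of_two_le h2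
    rw [popStackLoop, if_pos h2, if_neg heq, altLoop_step,
      if_neg (by intro hab
                 exact heq (by rw [pyGet?_concat2_neg1, pyGet?_concat2_neg2, hab]))]
  | case3 s c h2 =>
    rw [popStackLoop, if_neg h2, altLoop, dif_neg (by simp at h2 ⊢; omega)]

-- ===== VERDICT (by name: the statement is the Claim_ definition above) =====
theorem popStack_spec : Claim_equal_popStack := by
  intro stack _
  unfold Spec_popStack popStack popStack_alt
  exact loops_agree stack 0
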